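-- pv_equiv track=rewrite | github.com/soultreemk2/Coding-Test | 2. stack que.py | solution
-- ===== SOURCE A (Python) =====
-- def solution(progresses, speeds):
--     num = [0,]
--     answer = []
--     due_date = [0] * len(progresses)
--     progresses = list(map(lambda x : 100-x, progresses))
--     for i in range(len(progresses)):
--         due_date[i] = progresses[i]//speeds[i] if progresses[i] % speeds[i] == 0 else progresses[i]//speeds[i] + 1
--     for i in num:
--         tmp = list(map(lambda x : 0 if x <= due_date[i] else 1, due_date[i:]))
--         if 1 in tmp:
--             answer.append(tmp[0:tmp.index(1)].count(0))
--             num.append(tmp.index(1))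
--         else:
--             answer.append(tmp.count(0))
--     return answer
-- ===== SOURCE B (Python) =====
-- def solution(progresses, speeds):
--     answer = []
--     lead = None
--     cnt = 0
--     for p, s in zip(progresses, speeds):
--         d = -((p - 100) // s)          # ceil((100 - p) / s)
--         if lead is None or d > lead:
--             if cnt:
--                 answer.append(cnt)
--             lead = d
--             cnt = 1
--         else:
--             cnt += 1
--     if cnt:
--         answer.append(cnt)
--     return answer
-- ===== Notes on version B (the rewrite author's own statement) =====
-- stated objective: alternative
-- what changed: A repeatedly re-slices the due-date list, rebuilds 0/1 marker lists and scans them with index/count while driving a growing work-list (and loops forever once a third deployment group appears); B is a single linear pass over zip(progresses, speeds) that keeps the current group's leading due-date and a counter.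
-- intended difference: On empty input A returns [0] (an artefact of its seed work-list num=[0]); B returns [], the intended 'no features, no deployments' answer. — e.g. on solution([], []): A returns [0], B returns []
import Mathlib
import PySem

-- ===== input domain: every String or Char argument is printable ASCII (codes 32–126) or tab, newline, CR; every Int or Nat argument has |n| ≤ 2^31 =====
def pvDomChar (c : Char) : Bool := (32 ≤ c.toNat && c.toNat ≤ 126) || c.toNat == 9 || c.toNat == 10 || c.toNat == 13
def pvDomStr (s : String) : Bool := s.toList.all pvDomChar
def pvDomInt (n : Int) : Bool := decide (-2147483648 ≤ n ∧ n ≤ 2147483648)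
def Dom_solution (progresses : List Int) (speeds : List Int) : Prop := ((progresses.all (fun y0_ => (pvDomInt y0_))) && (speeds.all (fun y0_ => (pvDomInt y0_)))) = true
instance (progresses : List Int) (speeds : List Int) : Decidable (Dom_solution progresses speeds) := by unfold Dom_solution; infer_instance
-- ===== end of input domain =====

-- B replaces A's repeated slice/marker-list/index/count passes over a growing work-list by one
-- linear pass tracking the current deployment group's leading due-date (objective: alternative
-- single-pass algorithm; beyond two groups A does not terminate at all, which Pre_solution excludes).

-- ===== PORT A =====
-- the 'for i in range(len(progresses))' loop filling due_date; progresses[i]/speeds[i] are in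
-- range and speeds[i] ≠ 0 on every input admitted by Pre_solution, so getD is exact there
def solA_due (progresses speeds : List Int) : List Int :=
  (List.range progresses.length).map (fun i =>
    let p := 100 - progresses.getD i 0
    let s := speeds.getD i 0
    if PySem.Int.mod p s = 0 then PySem.Int.floordiv p s else PySem.Int.floordiv p s + 1)

-- the 'for i in num' loop over the growing list num, iterated by position k; the fuel only bounds
-- the iteration count (outside Pre_solution Python's loop can run forever; inside Pre_solution at
-- most two iterations happen, so the fuel is never exhausted there and the port is exact).
-- due_date[i] inside the lambda is evaluated only when due_date[i:] is non-empty, hence always in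
-- range, so pyGetD is exact; num[k] with k < len(num) likewise.
def solA_loop (d : List Int) : Nat → List Int → Nat → List Int → List Int
  | 0, _, _, answer => answer
  | fuel + 1, num, k, answer =>
    if k < num.length then
      let i := num.getD k 0
      let tmp := (PySem.List.slice d (some i) none).map
        (fun x => if x ≤ PySem.List.pyGetD d i 0 then (0 : Int) else 1)
      match PySem.List.index? tmp 1 with
      | some idx =>
          solA_loop d fuel (num ++ [(idx : Int)]) (k + 1)
            (answer ++ [((PySem.List.slice tmp (some 0) (some (idx : Int))).count 0 : Int)])
      | none => solA_loop d fuel num (k + 1) (answer ++ [(tmp.count 0 : Int)])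
    else answer

def solution (progresses : List Int) (speeds : List Int) : List Int :=
  let due := solA_due progresses speeds
  solA_loop due (due.length + 2) [0] 0 []

-- ===== PORT B =====
def solB_go : List (Int × Int) → Option Int → Int → List Int → List Int
  | [], _, cnt, answer => if cnt ≠ 0 then answer ++ [cnt] else answer
  | (p, s) :: rest, lead, cnt, answer =>
    let d := -(PySem.Int.floordiv (p - 100) s)
    match lead with
    | none => solB_go rest (some d) 1 (if cnt ≠ 0 then answer ++ [cnt] else answer)
    | some L =>
      if L < d then solB_go rest (some d) 1 (if cnt ≠ 0 then answer ++ [cnt] else answer)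
      else solB_go rest (some L) (cnt + 1) answer

def solution_alt (progresses : List Int) (speeds : List Int) : List Int :=
  solB_go (progresses.zip speeds) none 0 []

-- ===== PRECONDITION & SPEC =====
-- the due-date list (ceiling division, one value per zipped pair), for stating Pre_solution
def pvDue (progresses speeds : List Int) : List Int :=
  (progresses.zip speeds).map (fun z => -(PySem.Int.floordiv (z.1 - 100) z.2))

-- 'at most two deployment groups': if j is the first index whose due-date exceeds the head's,
-- every due-date after j is bounded by due[j]
def TwoGroup (d : List Int) : Prop :=
  ∀ j < d.length, ∀ k < d.length, j < k →
    (∀ i < j, d.getD i 0 ≤ d.getD 0 0) → d.getD 0 0 < d.getD j 0 →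
    d.getD k 0 ≤ d.getD j 0

-- Pre_solution: speeds covers progresses and is zero-free (Python's // and % raise
-- ZeroDivisionError, a short speeds list raises IndexError), and the due-date list has at most
-- two deployment groups: with a third group, A's 'num.append(tmp.index(1))' pushes a RELATIVE
-- offset and the for-loop over the growing num never terminates, so A returns no value there.
def Pre_solution (progresses : List Int) (speeds : List Int) : Prop :=
  progresses.length ≤ speeds.length ∧
  (∀ i < progresses.length, speeds.getD i 0 ≠ 0) ∧
  TwoGroup (pvDue progresses speeds)

instance (progresses : List Int) (speeds : List Int) : Decidable (Pre_solution progresses speeds) := by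
  unfold Pre_solution TwoGroup
  exact instDecidableAnd (dq := instDecidableAnd (dq := @Nat.decidableBallLT _ _ (fun j hj => by infer_instance)))

def pvWitness_solution : List Int × List Int := ([93, 30, 55], [1, 30, 5])

-- On empty input A returns [0] (an artefact of its seed work-list num = [0]); B returns [],
-- the intended 'no features, no deployments' answer.
def D_solution (progresses : List Int) (speeds : List Int) : Prop := progresses = []

instance (progresses : List Int) (speeds : List Int) : Decidable (D_solution progresses speeds) := by
  unfold D_solution; infer_instance

def Spec_solution (progresses : List Int) (speeds : List Int) (out : List Int) : Prop :=
  ¬ D_solution progresses speeds → out = solution_alt progresses speeds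
instance (progresses : List Int) (speeds : List Int) (out : List Int) : Decidable (Spec_solution progresses speeds out) := by unfold Spec_solution; infer_instance

def pvDiffWitness_solution : List Int × List Int := ([], [])
def pvDiffWitnessOut_solution : (List Int) × (List Int) := ([0], [])

-- ===== CLAIM (what is proved, stated in full; the proofs are below) =====
def Claim_unchanged_solution : Prop := ∀ (progresses : List Int) (speeds : List Int), Dom_solution progresses speeds → Pre_solution progresses speeds → Spec_solution progresses speeds (solution progresses speeds)
def Claim_changed_solution : Prop := Dom_solution (pvDiffWitness_solution.1) (pvDiffWitness_solution.2) ∧ Pre_solution (pvDiffWitness_solution.1) (pvDiffWitness_solution.2) ∧ D_solution (pvDiffWitness_solution.1) (pvDiffWitness_solution.2) ∧ solution (pvDiffWitness_solution.1) (pvDiffWitness_solution.2) = pvDiffWitnessOut_solution.1 ∧ solution_alt (pvDiffWitness_solution.1) (pvDiffWitness_solution.2) = pvDiffWitnessOut_solution.2 ∧ pvDiffWitnessOut_solution.1 ≠ pvDiffWitnessOut_solution.2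
def Claim_exact_solution : Prop := ∀ (progresses : List Int) (speeds : List Int), Dom_solution progresses speeds → Pre_solution progresses speeds → D_solution progresses speeds → solution progresses speeds ≠ solution_alt progresses speeds

-- ===== LEMMAS AND PROOFS =====

-- ceiling division with a positive divisor
lemma ceil_pos (a s : Int) (hs : 0 < s) :
    (if PySem.Int.mod a s = 0 then PySem.Int.floordiv a s else PySem.Int.floordiv a s + 1)
      = -(PySem.Int.floordiv (-a) s) := by
  have h1 := PySem.Int.floordiv_mul_add_mod a s
  have h2 : 0 ≤ PySem.Int.mod a s := PySem.Int.mod_nonneg a hs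
  have h3 : PySem.Int.mod a s < s := PySem.Int.mod_lt a hs
  split_ifs with h
  · symm; rw [PySem.Int.neg_floordiv_neg_eq_iff_of_pos hs]
    constructor <;> nlinarith
  · symm; rw [PySem.Int.neg_floordiv_neg_eq_iff_of_pos hs]
    have h4 : 0 < PySem.Int.mod a s := lt_of_le_of_ne h2 (Ne.symm h)
    constructor <;> nlinarith

-- A's '(p//s if p%s==0 else p//s+1)' equals B's '-((−p)//s)' for every s ≠ 0
lemma ceil_div_eq (a s : Int) (hs : s ≠ 0) :
    (if PySem.Int.mod a s = 0 then PySem.Int.floordiv a s else PySem.Int.floordiv a s + 1)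
      = -(PySem.Int.floordiv (-a) s) := by
  rcases lt_or_gt_of_ne hs with hneg | hpos
  · set t := -s with ht
    have hst : s = -t := by omega
    have hmod : PySem.Int.mod a s = -PySem.Int.mod (-a) t := by
      rw [hst]; simpa using PySem.Int.mod_neg_neg (-a) t
    have hdiv : PySem.Int.floordiv a s = PySem.Int.floordiv (-a) t := by
      rw [hst]; simpa using PySem.Int.floordiv_neg_neg (-a) t
    have hdiv2 : PySem.Int.floordiv (-a) s = PySem.Int.floordiv a t := by
      rw [hst]; simp [PySem.Int.floordiv_neg_neg a t]
    rw [hmod, hdiv, hdiv2]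
    simp only [neg_eq_zero]
    have := ceil_pos (-a) t (by omega)
    simpa using this
  · exact ceil_pos a s hpos

-- the two due-date computations agree under Pre_solution
lemma due_eq (p s : List Int) (hlen : p.length ≤ s.length)
    (hs0 : ∀ i < p.length, s.getD i 0 ≠ 0) : solA_due p s = pvDue p s := by
  apply List.ext_getElem
  · simp [solA_due, pvDue, List.length_zip]; omega
  · intro i h1 h2
    have hip : i < p.length := by simpa [solA_due] using h1
    have his : i < s.length := lt_of_lt_of_le hip hlen
    have hs' : s.getD i 0 ≠ 0 := hs0 i hip
    simp only [solA_due, pvDue, List.getElem_map, List.getElem_range, List.getElem_zip]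
    have hg1 : p.getD i 0 = p[i] := List.getD_eq_getElem p 0 hip
    have hg2 : s.getD i 0 = s[i] := List.getD_eq_getElem s 0 his
    rw [hg2] at hs'
    simp only [hg1, hg2]
    have := ceil_div_eq (100 - p[i]) s[i] hs'
    rw [this]
    ring_nf

-- B's loop, viewed on the due-dates alone
def goD : List Int → Option Int → Int → List Int → List Int
  | [], _, cnt, answer => if cnt ≠ 0 then answer ++ [cnt] else answer
  | x :: rest, lead, cnt, answer =>
    match lead with
    | none => goD rest (some x) 1 (if cnt ≠ 0 then answer ++ [cnt] else answer)
    | some L =>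
      if L < x then goD rest (some x) 1 (if cnt ≠ 0 then answer ++ [cnt] else answer)
      else goD rest (some L) (cnt + 1) answer

lemma solB_eq_goD (zs : List (Int × Int)) (lead : Option Int) (cnt : Int) (ans : List Int) :
    solB_go zs lead cnt ans = goD (zs.map (fun z => -(PySem.Int.floordiv (z.1 - 100) z.2))) lead cnt ans := by
  induction zs generalizing lead cnt ans with
  | nil => rfl
  | cons z rest ih =>
    obtain ⟨p, s⟩ := z
    cases lead with
    | none => simp only [solB_go, goD, List.map_cons]; exact ih _ _ _
    | some L =>
      simp only [solB_go, goD, List.map_cons]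
      split_ifs <;> exact ih _ _ _

lemma goD_all_le (ds : List Int) (L cnt : Int) (ans : List Int)
    (h : ∀ x ∈ ds, x ≤ L) (hc : 0 < cnt) :
    goD ds (some L) cnt ans = ans ++ [cnt + ds.length] := by
  induction ds generalizing cnt ans with
  | nil =>
    have : cnt ≠ 0 := by omega
    simp [goD, this]
  | cons x rest ih =>
    have hx : ¬ L < x := not_lt.mpr (h x (by simp))
    simp only [goD, if_neg hx]
    rw [ih _ _ (fun y hy => h y (List.mem_cons_of_mem _ hy)) (by omega)]
    have hl : (((x :: rest).length : Nat) : Int) = (rest.length : Int) + 1 := by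
      push_cast [List.length_cons]; ring
    rw [hl]
    ring_nf

lemma goD_split (ds1 ds2 : List Int) (L cnt : Int) (ans : List Int)
    (h : ∀ x ∈ ds1, ¬ L < x) :
    goD (ds1 ++ ds2) (some L) cnt ans = goD ds2 (some L) (cnt + ds1.length) ans := by
  induction ds1 generalizing cnt with
  | nil => simp
  | cons x rest ih =>
    have hx : ¬ L < x := h x (by simp)
    simp only [List.cons_append, goD, if_neg hx]
    rw [ih _ (fun y hy => h y (List.mem_cons_of_mem _ hy))]
    have hl : (((x :: rest).length : Nat) : Int) = (rest.length : Int) + 1 := by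
      push_cast [List.length_cons]; ring
    rw [hl]
    ring_nf

-- one unfolding of A's loop when the body runs
lemma solA_step (d : List Int) (fuel : Nat) (num : List Int) (k : Nat) (ans : List Int)
    (hk : k < num.length) :
    solA_loop d (fuel + 1) num k ans =
      (let i := num.getD k 0
       let tmp := (PySem.List.slice d (some i) none).map
        (fun x => if x ≤ PySem.List.pyGetD d i 0 then (0 : Int) else 1)
       match PySem.List.index? tmp 1 with
       | some idx =>
          solA_loop d fuel (num ++ [(idx : Int)]) (k + 1)
            (ans ++ [((PySem.List.slice tmp (some 0) (some (idx : Int))).count 0 : Int)])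
       | none => solA_loop d fuel num (k + 1) (ans ++ [(tmp.count 0 : Int)])) := by
  rw [solA_loop, if_pos hk]

lemma solA_stop (d : List Int) (fuel : Nat) (num : List Int) (k : Nat) (ans : List Int)
    (hk : ¬ k < num.length) :
    solA_loop d (fuel + 1) num k ans = ans := by
  rw [solA_loop, if_neg hk]

-- A's loop on a one-group due-date list
lemma solA_one (d : List Int) (hne : d ≠ []) (hall : ∀ x ∈ d, x ≤ d.getD 0 0) :
    solA_loop d (d.length + 2) [0] 0 [] = [(d.length : Int)] := by
  obtain ⟨m, hm⟩ : ∃ m, d.length = m + 1 := ⟨d.length - 1, by cases d <;> simp_all⟩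
  have htmp : (PySem.List.slice d (some ((0:Int))) none).map
      (fun x => if x ≤ PySem.List.pyGetD d (0:Int) 0 then (0 : Int) else 1)
      = List.replicate d.length 0 := by
    have hs : PySem.List.slice d (some ((0:Nat):Int)) none = d := by
      rw [PySem.List.slice_from_natCast]; simp
    have hs' : PySem.List.slice d (some (0:Int)) none = d := by simp_all
    have h0 : PySem.List.pyGetD d (0:Int) 0 = d.getD 0 0 := PySem.List.pyGetD_zero d 0
    rw [hs', h0]
    have := List.eq_replicate_of_mem (a := (0:Int))
      (l := d.map (fun x => if x ≤ d.getD 0 0 then (0:Int) else 1)) ?_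
    · simpa using this
    · intro b hb
      obtain ⟨x, hx, rfl⟩ := List.mem_map.mp hb
      exact if_pos (hall x hx)
  have hidx : PySem.List.index? (List.replicate d.length (0:Int)) 1 = none := by
    rw [PySem.List.index?_eq_none_iff]
    simp [List.mem_replicate]
  rw [hm]
  rw [show m + 1 + 2 = (m + 2) + 1 from rfl]
  rw [solA_step d (m+2) [0] 0 [] (by simp)]
  simp only [List.getD_cons_zero]
  rw [htmp, hidx]
  simp only []
  rw [List.count_replicate_self]
  rw [show m + 2 = (m + 1) + 1 from rfl]
  rw [solA_stop d (m+1) [0] 1 _ (by simp)]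
  simp [hm]

-- A's loop on a two-group due-date list
lemma solA_two (d front : List Int) (dj : Int) (back : List Int)
    (hd : d = front ++ dj :: back) (hfr : ∀ x ∈ front, x ≤ d.getD 0 0) (hfne : front ≠ [])
    (hdj : d.getD 0 0 < dj) (hback : ∀ x ∈ back, x ≤ dj) :
    solA_loop d (d.length + 2) [0] 0 [] = [(front.length : Int), ((back.length : Int) + 1)] := by
  set j := front.length with hj
  have hj1 : 1 ≤ j := by
    cases front with
    | nil => exact absurd rfl hfne
    | cons a l => simp [hj]
  have hlen : d.length = j + 1 + back.length := by simp [hd, hj]; omega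
  have hs1 : PySem.List.slice d (some (0:Int)) none = d := by
    have h := PySem.List.slice_from_natCast (xs := d) (a := 0)
    simp_all
  have h00 : PySem.List.pyGetD d (0:Int) 0 = d.getD 0 0 := PySem.List.pyGetD_zero d 0
  have hfmap : front.map (fun x => if x ≤ d.getD 0 0 then (0:Int) else 1) = List.replicate j 0 := by
    have := List.eq_replicate_of_mem (a := (0:Int))
      (l := front.map (fun x => if x ≤ d.getD 0 0 then (0:Int) else 1)) ?_
    · simpa [hj] using this
    · intro b hb
      obtain ⟨x, hx, rfl⟩ := List.mem_map.mp hb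
      exact if_pos (hfr x hx)
  have htmp1 : d.map (fun x => if x ≤ d.getD 0 0 then (0:Int) else 1)
      = List.replicate j 0 ++ 1 :: back.map (fun x => if x ≤ d.getD 0 0 then (0:Int) else 1) := by
    rw [hd]; simp only [List.map_append, List.map_cons]
    rw [← hd, hfmap, if_neg (not_le.mpr hdj)]
  have hidx1 : PySem.List.index?
      (List.replicate j (0:Int) ++ 1 :: back.map (fun x => if x ≤ d.getD 0 0 then (0:Int) else 1)) 1
      = some j := by
    rw [PySem.List.index?_eq_some_iff]
    exact ⟨List.replicate j 0, _, rfl, by simp, by simp [List.mem_replicate]⟩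
  have htake : (List.replicate j (0:Int) ++ 1 :: back.map (fun x => if x ≤ d.getD 0 0 then (0:Int) else 1)).take j
      = List.replicate j 0 := List.take_left' (by simp)
  have hdrop : d.drop j = dj :: back := by rw [hd]; exact List.drop_left' (by simp [hj])
  have hs2 : PySem.List.slice d (some ((j:Nat):Int)) none = dj :: back := by
    rw [PySem.List.slice_from_natCast, hdrop]
  have hgj : d.getD j 0 = dj := by
    rw [List.getD_eq_getElem?_getD, hd, List.getElem?_append_right (by simp [hj])]
    simp [hj]
  have htmp2 : (dj :: back).map (fun x => if x ≤ dj then (0:Int) else 1)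
      = List.replicate (back.length + 1) 0 := by
    have := List.eq_replicate_of_mem (a := (0:Int))
      (l := (dj :: back).map (fun x => if x ≤ dj then (0:Int) else 1)) ?_
    · simpa using this
    · intro b hb
      obtain ⟨x, hx, rfl⟩ := List.mem_map.mp hb
      rcases List.mem_cons.mp hx with rfl | hx'
      · simp
      · exact if_pos (hback x hx')
  have hidx2 : PySem.List.index? (List.replicate (back.length + 1) (0:Int)) 1 = none := by
    rw [PySem.List.index?_eq_none_iff]; simp [List.mem_replicate]
  obtain ⟨m, hm⟩ : ∃ m, d.length = m + 2 := ⟨d.length - 2, by omega⟩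
  rw [hm, show m + 2 + 2 = (m + 3) + 1 from rfl]
  rw [solA_step d (m+3) [0] 0 [] (by simp)]
  simp only [List.getD_cons_zero]
  rw [hs1, h00, htmp1, hidx1]
  simp only []
  rw [show PySem.List.slice
        (List.replicate j (0:Int) ++ 1 :: back.map (fun x => if x ≤ d.getD 0 0 then (0:Int) else 1))
        (some 0) (some ((j:Nat):Int)) =
      (List.replicate j (0:Int) ++ 1 :: back.map (fun x => if x ≤ d.getD 0 0 then (0:Int) else 1)).take j by
    simp [PySem.List.slice_to_natCast]]
  rw [htake, List.count_replicate_self]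
  rw [show ([0] ++ [(j:Int)]) = [0, (j:Int)] from rfl, show (0+1) = 1 from rfl,
      show ([] ++ [(j:Int)]) = [(j:Int)] from rfl]
  rw [show m + 3 = (m + 2) + 1 from rfl]
  rw [solA_step d (m+2) [0, (j:Int)] 1 _ (by simp)]
  simp only [List.getD_cons_succ, List.getD_cons_zero]
  rw [hs2, PySem.List.pyGetD_natCast, hgj, htmp2, hidx2]
  simp only []
  rw [List.count_replicate_self]
  rw [show m + 2 = (m + 1) + 1 from rfl]
  rw [solA_stop d (m+1) [0, (j:Int)] 2 _ (by simp)]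
  simp

-- ===== VERDICT (by name: the statement is the Claim_ definition above) =====
theorem solution_spec : Claim_unchanged_solution := by
  intro p s hdom hpre hnD
  obtain ⟨hlen, hs0, htwo⟩ := hpre
  have hdue : solA_due p s = pvDue p s := due_eq p s hlen hs0
  set d := pvDue p s with hdpv
  have hdlen : d.length = p.length := by
    simp [hdpv, pvDue, List.length_zip]; omega
  have hpne : p ≠ [] := hnD
  have hdne : d ≠ [] := by
    intro h
    exact hpne (List.length_eq_zero_iff.mp (by rw [← hdlen, h]; rfl))
  have hA : solution p s = solA_loop d (d.length + 2) [0] 0 [] := by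
    show solA_loop (solA_due p s) ((solA_due p s).length + 2) [0] 0 [] = _
    rw [hdue]
  have hB : solution_alt p s = goD d none 0 [] := by
    show solB_go (p.zip s) none 0 [] = _
    rw [solB_eq_goD]; rfl
  rw [hA, hB]
  clear_value d
  clear hdue hdpv hdlen
  obtain ⟨d0, dtl, rfl⟩ : ∃ d0 dtl, d = d0 :: dtl := by
    cases hc : d with
    | nil => exact absurd hc hdne
    | cons a l => exact ⟨a, l, rfl⟩
  have hd0 : (d0 :: dtl).getD 0 0 = d0 := rfl
  cases hdw : (d0 :: dtl).dropWhile (fun x => decide (x ≤ d0)) with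
  | nil =>
    -- a single deployment group
    have hall : ∀ x ∈ d0 :: dtl, x ≤ (d0 :: dtl).getD 0 0 := by
      intro x hx
      have hx' : x ∈ (d0 :: dtl).takeWhile (fun x => decide (x ≤ d0)) := by
        rw [← List.takeWhile_append_dropWhile
          (p := fun x => decide (x ≤ d0)) (l := d0 :: dtl), hdw] at hx
        simpa using hx
      have := List.mem_takeWhile_imp hx'
      simpa [hd0] using this
    rw [solA_one _ hdne hall]
    have : goD (d0 :: dtl) none 0 [] = goD dtl (some d0) 1 [] := by simp [goD]
    rw [this, goD_all_le dtl d0 1 []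
      (fun x hx => by simpa [hd0] using hall x (List.mem_cons_of_mem _ hx)) (by omega)]
    simp
    omega
  | cons dj back =>
    -- exactly two deployment groups
    set front := (d0 :: dtl).takeWhile (fun x => decide (x ≤ d0)) with hfrdef
    have hd : d0 :: dtl = front ++ dj :: back := by
      rw [hfrdef, ← hdw, List.takeWhile_append_dropWhile]
    have hfr : ∀ x ∈ front, x ≤ (d0 :: dtl).getD 0 0 := by
      intro x hx
      have := List.mem_takeWhile_imp (hfrdef ▸ hx)
      simpa [hd0] using this
    have hdj : (d0 :: dtl).getD 0 0 < dj := by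
      have hne : (d0 :: dtl).dropWhile (fun x => decide (x ≤ d0)) ≠ [] := by
        rw [hdw]; simp
      have h1 := List.head_dropWhile_not (fun x => decide (x ≤ d0)) hne
      have h2 : ((d0 :: dtl).dropWhile (fun x => decide (x ≤ d0))).head hne = dj := by
        simp only [hdw, List.head_cons]
      rw [h2] at h1
      simp only [decide_eq_false_iff_not, not_le] at h1
      simpa [hd0] using h1
    have hfne : front ≠ [] := by
      intro h
      rw [h, List.nil_append] at hd
      have : d0 = dj := by injection hd
      rw [hd0] at hdj; omega
    have hjlen : (d0 :: dtl).length = front.length + 1 + back.length := by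
      rw [hd]; simp; omega
    have hback : ∀ x ∈ back, x ≤ dj := by
      intro x hx
      obtain ⟨m, hmlt, rfl⟩ := List.mem_iff_getElem.mp hx
      have hj1 : front.length < (d0 :: dtl).length := by omega
      have hk1 : front.length + 1 + m < (d0 :: dtl).length := by omega
      have hgj : (d0 :: dtl).getD front.length 0 = dj := by
        rw [List.getD_eq_getElem?_getD, hd, List.getElem?_append_right (by simp)]
        simp
      have hgk : (d0 :: dtl).getD (front.length + 1 + m) 0 = back[m] := by
        rw [List.getD_eq_getElem?_getD, hd,
            List.getElem?_append_right (by omega)]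
        have : front.length + 1 + m - front.length = m + 1 := by omega
        rw [this]
        simp [hmlt]
      have hpre : ∀ i < front.length, (d0 :: dtl).getD i 0 ≤ (d0 :: dtl).getD 0 0 := by
        intro i hi
        have : (d0 :: dtl).getD i 0 = front[i] := by
          rw [List.getD_eq_getElem?_getD, hd, List.getElem?_append_left (by omega)]
          simp [hi]
        rw [this]
        exact hfr _ (List.getElem_mem _)
      have := htwo front.length hj1 (front.length + 1 + m) hk1
        (by omega) hpre (by rw [hgj]; exact hdj)
      rw [hgj, hgk] at this
      exact this
    rw [solA_two _ front dj back hd hfr hfne hdj hback]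
    -- B's side
    clear_value front
    obtain ⟨f0, ftl, rfl⟩ : ∃ f0 ftl, front = f0 :: ftl := by
      cases hc : front with
      | nil => exact absurd hc hfne
      | cons a l => exact ⟨a, l, rfl⟩
    have hf0 : f0 = d0 := by
      have h := hd
      rw [List.cons_append] at h
      injection h with h1 h2
      exact h1.symm
    have hB1 : goD (d0 :: dtl) none 0 [] = goD (ftl ++ dj :: back) (some d0) 1 [] := by
      conv_lhs => rw [hd, List.cons_append]
      simp [goD, hf0]
    rw [hB1, goD_split ftl (dj :: back) d0 1 []
      (fun x hx => not_lt.mpr (by simpa [hd0, hf0] using hfr x (List.mem_cons_of_mem _ hx)))]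
    have hlt : d0 < dj := by simpa [hd0] using hdj
    have hB2 : goD (dj :: back) (some d0) (1 + (ftl.length : Int)) [] =
        goD back (some dj) 1 [1 + (ftl.length : Int)] := by
      simp only [goD, if_pos hlt]
      congr 1
      have : (1 : Int) + (ftl.length : Int) ≠ 0 := by positivity
      simp [this]
    rw [hB2, goD_all_le back dj 1 _ hback (by omega)]
    simp
    constructor <;> omega

theorem solution_changed : Claim_changed_solution := by
  unfold Claim_changed_solution; decide

theorem solution_tight : Claim_exact_solution := by
  intro p s _ _ hD
  rw [hD]
  have hA : solution [] s = [0] := rfl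
  have hB : solution_alt [] s = [] := rfl
  rw [hA, hB]
  simp
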